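-- pv_equiv track=rewrite | github.com/SymphonyIceAttack/pytoexe-use | python-files/1770337587428-ad56-lastest.py | parse_angle_string
-- ===== SOURCE A (Python) =====
-- def parse_angle_string(angle_str):
--     """解析角度字符串，处理C++代码中的特殊逻辑"""
--     numbers = []
--     current_num = 0
--     num_started = False
--
--     for ch in angle_str:
--         if ch.isdigit():
--             current_num = current_num * 10 + int(ch)
--             num_started = True
--         elif ch == ',':
--             if num_started:
--                 numbers.append(current_num)
--                 current_num = 0
--                 num_started = False
--         elif ch == '-':
--             if num_started:
--                 numbers.append(current_num)
--                 current_num = 0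
--                 num_started = False
--
--     if num_started:
--         numbers.append(current_num)
--
--     return numbers
-- ===== SOURCE B (Python) =====
-- def parse_angle_string(angle_str):
--     """解析角度字符串，处理C++代码中的特殊逻辑"""
--     numbers = []
--     for token in angle_str.replace('-', ',').split(','):
--         digits = ''.join(ch for ch in token if ch.isdigit())
--         if digits:
--             numbers.append(int(digits))
--     return numbers
-- ===== Notes on version B (the rewrite author's own statement) =====
-- stated objective: idiomatic
-- what changed: Replaces A's per-character accumulator state machine (current_num/num_started flags) by a token-based pass: normalise '-' to ',', split on ',', keep each token's digit characters and convert the non-empty digit strings with int().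
import Mathlib
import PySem

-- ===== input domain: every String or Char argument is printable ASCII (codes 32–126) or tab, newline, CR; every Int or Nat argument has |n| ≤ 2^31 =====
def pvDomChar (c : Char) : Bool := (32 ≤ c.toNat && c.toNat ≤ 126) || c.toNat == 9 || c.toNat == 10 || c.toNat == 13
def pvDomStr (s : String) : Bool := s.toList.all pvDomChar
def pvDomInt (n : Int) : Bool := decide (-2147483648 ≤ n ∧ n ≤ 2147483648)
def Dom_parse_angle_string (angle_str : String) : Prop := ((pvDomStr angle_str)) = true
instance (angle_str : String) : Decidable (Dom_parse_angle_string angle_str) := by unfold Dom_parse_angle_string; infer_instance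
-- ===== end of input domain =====

-- B replaces A's per-character accumulator state machine by an idiomatic tokenising pass:
-- normalise '-' to ',', split on ',', keep each token's digits, convert non-empty ones.
-- On the ASCII domain Char.isDigit coincides with Python's ch.isdigit().

-- ===== PORT A =====
-- state machine: (numbers so far, current_num, num_started); one step per character
def pvStepA (st : List Int × Int × Bool) (ch : Char) : List Int × Int × Bool :=
  let (numbers, current_num, num_started) := st
  if ch.isDigit then
    (numbers, current_num * 10 + ((ch.toNat : Int) - 48), true)
  else if ch = ',' then
    if num_started then (numbers ++ [current_num], 0, false) else (numbers, current_num, num_started)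
  else if ch = '-' then
    if num_started then (numbers ++ [current_num], 0, false) else (numbers, current_num, num_started)
  else (numbers, current_num, num_started)

def parse_angle_string (angle_str : String) : List Int :=
  let (numbers, current_num, num_started) := angle_str.toList.foldl pvStepA ([], 0, false)
  if num_started then numbers ++ [current_num] else numbers

-- ===== PORT B =====
-- split a char list on ',' (tokens between separators; n separators give n+1 tokens)
def pvSplit (cs : List Char) : List (List Char) :=
  match cs with
  | [] => [[]]
  | c :: rest =>
    if c = ',' then [] :: pvSplit rest
    else (pvSplit rest).modifyHead (fun t => c :: t)

-- int(digits) for a string of ASCII digit characters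
def pvIntOfDigits (ds : List Char) : Int :=
  ds.foldl (fun a c => a * 10 + ((c.toNat : Int) - 48)) 0

-- token → its converted digit string, none when the digit string is empty
def pvTokVal (t : List Char) : Option Int :=
  let digits := t.filter Char.isDigit
  if digits.isEmpty then none else some (pvIntOfDigits digits)

def parse_angle_string_alt (angle_str : String) : List Int :=
  (pvSplit (angle_str.toList.map (fun c => if c = '-' then ',' else c))).filterMap pvTokVal

-- ===== PRECONDITION & SPEC =====
def Spec_parse_angle_string (angle_str : String) (out : List Int) : Prop := out = parse_angle_string_alt angle_str
instance (angle_str : String) (out : List Int) : Decidable (Spec_parse_angle_string angle_str out) := by unfold Spec_parse_angle_string; infer_instance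

-- ===== CLAIM (what is proved, stated in full; the proofs are below) =====
def Claim_equal_parse_angle_string : Prop := ∀ (angle_str : String), Dom_parse_angle_string angle_str → Spec_parse_angle_string angle_str (parse_angle_string angle_str)

-- ===== LEMMAS AND PROOFS =====

-- processing the first token, whose digits continue A's in-flight state (current_num, num_started)
def pvFirstVal (cur : Int) (started : Bool) (t : List Char) : Option Int :=
  let digits := t.filter Char.isDigit
  if started || !digits.isEmpty then
    some (digits.foldl (fun a c => a * 10 + ((c.toNat : Int) - 48)) cur)
  else none

theorem pvSplit_ne_nil (cs : List Char) : pvSplit cs ≠ [] := by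
  induction cs with
  | nil => simp [pvSplit]
  | cons c rest ih =>
    simp only [pvSplit]
    split
    · simp
    · cases h : pvSplit rest with
      | nil => exact absurd h ih
      | cons t ts => simp [List.modifyHead]

theorem pvFirstVal_zero_false (t : List Char) : pvFirstVal 0 false t = pvTokVal t := by
  cases h : t.filter Char.isDigit <;> simp [pvFirstVal, pvTokVal, pvIntOfDigits, h]

-- token-wise processing where the first token starts from the neutral state is plain filterMap
theorem pvFilterMap_split (xs : List Char) :
    (match pvSplit xs with
      | [] => ([] : List Int)
      | t :: ts => (pvFirstVal 0 false t).toList ++ ts.filterMap pvTokVal) =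
    (pvSplit xs).filterMap pvTokVal := by
  cases h : pvSplit xs with
  | nil => exact absurd h (pvSplit_ne_nil _)
  | cons t ts =>
    show (pvFirstVal 0 false t).toList ++ ts.filterMap pvTokVal = _
    rw [pvFirstVal_zero_false, List.filterMap_cons]
    cases pvTokVal t <;> simp

-- main invariant: A's fold from state (numbers, cur, started) followed by the final flush equals
-- numbers ++ the token-wise processing of the remaining characters, with the first token
-- continuing the in-flight state (cur, started); A maintains cur = 0 whenever started = false
theorem pvInvariant (cs : List Char) : ∀ (numbers : List Int) (cur : Int) (started : Bool),
    (started = false → cur = 0) →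
    (if (cs.foldl pvStepA (numbers, cur, started)).2.2 then
       (cs.foldl pvStepA (numbers, cur, started)).1 ++ [(cs.foldl pvStepA (numbers, cur, started)).2.1]
     else (cs.foldl pvStepA (numbers, cur, started)).1) =
    numbers ++ (match pvSplit (cs.map (fun c => if c = '-' then ',' else c)) with
      | [] => []
      | t :: ts => (pvFirstVal cur started t).toList ++ ts.filterMap pvTokVal) := by
  induction cs with
  | nil =>
    intro numbers cur started _
    cases started <;> simp [pvSplit, pvFirstVal]
  | cons c rest ih =>
    intro numbers cur started hcur
    by_cases hd : c.isDigit
    · -- digit: extends both A's accumulator and the head token's digit string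
      have hc : ¬ c = ',' := by rintro rfl; simp [Char.isDigit] at hd
      have hh : ¬ c = '-' := by rintro rfl; simp [Char.isDigit] at hd
      simp only [List.map_cons, List.foldl_cons, pvStepA, hd, if_pos, pvSplit, hh, hc, if_neg, if_false]
      rw [ih _ _ _ (by simp)]
      cases h : pvSplit (rest.map (fun c => if c = '-' then ',' else c)) with
      | nil => exact absurd h (pvSplit_ne_nil _)
      | cons t ts => simp [List.modifyHead, pvFirstVal, hd]
    · by_cases hsep : c = ',' ∨ c = '-'
      · -- separator: A flushes iff started; B starts a new token
        have hm : (if c = '-' then ',' else c) = ',' := by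
          rcases hsep with rfl | rfl <;> simp
        have hstep : pvStepA (numbers, cur, started) c =
            ((if started then numbers ++ [cur] else numbers), (if started then 0 else cur), false) := by
          rcases hsep with rfl | rfl <;> cases started <;> simp [pvStepA, Char.isDigit]
        simp only [List.map_cons, hm, List.foldl_cons, hstep, pvSplit, if_pos]
        cases started
        · rw [hcur rfl]
          simp only [Bool.false_eq_true, if_false]
          rw [ih _ _ _ (fun _ => rfl), pvFilterMap_split]
          simp [pvFirstVal]
        · simp only [if_true]
          rw [ih _ _ _ (fun _ => rfl), pvFilterMap_split]
          simp [pvFirstVal]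
      · -- other character: A ignores it; B's digit filter drops it from the head token
        have hc : ¬ c = ',' := fun h => hsep (Or.inl h)
        have hh : ¬ c = '-' := fun h => hsep (Or.inr h)
        have hstep : pvStepA (numbers, cur, started) c = (numbers, cur, started) := by
          simp [pvStepA, hd, hc, hh]
        have hm : (if c = '-' then ',' else c) = c := by simp [hh]
        simp only [List.map_cons, hm, List.foldl_cons, hstep, pvSplit, if_neg hc]
        rw [ih _ _ _ hcur]
        cases h : pvSplit (rest.map (fun c => if c = '-' then ',' else c)) with
        | nil => exact absurd h (pvSplit_ne_nil _)
        | cons t ts => simp [List.modifyHead, pvFirstVal, hd]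

-- ===== VERDICT (by name: the statement is the Claim_ definition above) =====
theorem parse_angle_string_spec : Claim_equal_parse_angle_string := by
  intro angle_str _
  unfold Spec_parse_angle_string parse_angle_string parse_angle_string_alt
  have h := pvInvariant angle_str.toList [] 0 false (fun _ => rfl)
  rw [pvFilterMap_split] at h
  simp only [List.nil_append] at h
  rcases hfold : angle_str.toList.foldl pvStepA ([], 0, false) with ⟨ns, cn, st⟩
  rw [hfold] at h
  simpa using h
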